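-- pv_equiv track=rewrite | github.com/SlapOS/slapos.core | master/bt5/slapos_crm/SkinTemplateItem/portal_skins/slapos_crm_monitoring/SupportRequestModule_getMonitoringOPMLDescriptionList.py | getCredentialFromUrl
-- ===== SOURCE A (Python) =====
-- def getCredentialFromUrl(parameter_string):
--   username = ''
--   password = ''
--   if 'username' in parameter_string and \
--      'password' in parameter_string:
--     param_list = parameter_string.split('&')
--     for param in param_list:
--       key, value = param.split('=')
--       if key == 'username':
--         username = value
--       elif key == 'password':
--         password = value
--
--   return (username, password,)
-- ===== SOURCE B (Python) =====
-- def _last_value(segments, prefix):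
--   # scan back-to-front: the last assignment wins, so the first match from the end is the answer
--   for seg in reversed(segments):
--     if seg.startswith(prefix):
--       return seg[len(prefix):]
--   return ''
--
--
-- def getCredentialFromUrl(parameter_string):
--   if 'username' in parameter_string and 'password' in parameter_string:
--     segments = parameter_string.split('&')
--     return (_last_value(segments, 'username='),
--             _last_value(segments, 'password='))
--   return ('', '')
-- ===== Notes on version B (the rewrite author's own statement) =====
-- stated objective: alternative
-- what changed: Instead of one forward pass splitting every segment on '=' and mutating two accumulators, B makes a per-key backward scan with early exit: for each key it returns the suffix of the last '&'-segment that starts with 'key=', never calling split('=').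
import Mathlib
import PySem

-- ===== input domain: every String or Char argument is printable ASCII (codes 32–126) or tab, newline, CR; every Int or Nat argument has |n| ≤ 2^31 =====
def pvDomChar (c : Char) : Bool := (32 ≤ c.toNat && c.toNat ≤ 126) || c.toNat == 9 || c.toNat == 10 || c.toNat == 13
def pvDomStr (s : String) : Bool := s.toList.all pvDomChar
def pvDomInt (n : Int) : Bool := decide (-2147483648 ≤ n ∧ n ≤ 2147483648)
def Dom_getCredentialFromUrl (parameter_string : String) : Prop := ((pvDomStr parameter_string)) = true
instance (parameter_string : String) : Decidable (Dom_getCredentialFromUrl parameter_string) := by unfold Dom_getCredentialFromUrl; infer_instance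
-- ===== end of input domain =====

-- B replaces A's single forward pass (split each segment on '=', mutate two accumulators)
-- by a per-key backward scan with early exit that never splits on '=' (objective: alternative).

-- shared builtin: s.split(sep) for the non-empty literal seps "&", "=" below
def pySplit (s sep : String) : List String := (PySem.Str.split? s sep).getD []

-- ===== PORT A =====
-- loop body: 'key, value = param.split("=")' raises unless exactly 2 parts (excluded by Pre_)
def credStepA (up : String × String) (param : String) : String × String :=
  match pySplit param "=" with
  | [key, value] =>
    if key == "username" then (value, up.2)
    else if key == "password" then (up.1, value)
    else up
  | _ => up

def getCredentialFromUrl (parameter_string : String) : String × String :=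
  if PySem.Str.isIn "username" parameter_string && PySem.Str.isIn "password" parameter_string then
    (pySplit parameter_string "&").foldl credStepA ("", "")
  else ("", "")

-- ===== PORT B =====
-- _last_value: 'for seg in reversed(segments): if seg.startswith(prefix): return seg[len(prefix):]'
-- ported as recursion over the reversed list (early return = stop recursing)
def lastValue (segments : List String) (pre : String) : String :=
  match segments with
  | [] => ""
  | seg :: rest =>
    if PySem.Str.startswith seg pre then
      PySem.Str.slice seg (some (PySem.Str.len pre)) none
    else lastValue rest pre

def getCredentialFromUrl_alt (parameter_string : String) : String × String :=
  if PySem.Str.isIn "username" parameter_string && PySem.Str.isIn "password" parameter_string then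
    let segments := pySplit parameter_string "&"
    (lastValue segments.reverse "username=", lastValue segments.reverse "password=")
  else ("", "")

-- ===== PRECONDITION & SPEC =====
-- Pre_ excludes exactly the inputs on which A raises ValueError: when both substrings occur,
-- every '&'-separated segment must contain exactly one '='.
def Pre_getCredentialFromUrl (parameter_string : String) : Prop :=
  (PySem.Str.isIn "username" parameter_string && PySem.Str.isIn "password" parameter_string) = true →
    ∀ p ∈ pySplit parameter_string "&", (pySplit p "=").length = 2
instance (parameter_string : String) : Decidable (Pre_getCredentialFromUrl parameter_string) := by
  unfold Pre_getCredentialFromUrl; infer_instance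
def pvWitness_getCredentialFromUrl : String := "username=u&password=p"

def Spec_getCredentialFromUrl (parameter_string : String) (out : String × String) : Prop := out = getCredentialFromUrl_alt parameter_string
instance (parameter_string : String) (out : String × String) : Decidable (Spec_getCredentialFromUrl parameter_string out) := by unfold Spec_getCredentialFromUrl; infer_instance

-- ===== CLAIM (what is proved, stated in full; the proofs are below) =====
def Claim_equal_getCredentialFromUrl : Prop := ∀ (parameter_string : String), Dom_getCredentialFromUrl parameter_string → Pre_getCredentialFromUrl parameter_string → Spec_getCredentialFromUrl parameter_string (getCredentialFromUrl parameter_string)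
-- ===== LEMMAS AND PROOFS =====

-- reference form of one '='-split piece builder (proof-only; mirrors Chars.splitOn.go on sep ['='])
def eqSplit (pre : List Char) (l : List Char) : List (List Char) :=
  match l with
  | [] => [pre]
  | c :: rest => if c = '=' then pre :: eqSplit [] rest else eqSplit (pre ++ [c]) rest

theorem go_eq_eqSplit (fuel : Nat) (l cur : List Char) (acc : List (List Char)) (h : l.length < fuel) :
    PySem.Chars.splitOn.go ['='] fuel l cur acc = acc.reverse ++ eqSplit cur.reverse l := by
  induction fuel generalizing l cur acc with
  | zero => omega
  | succ fuel ih =>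
    cases l with
    | nil =>
      rw [PySem.Chars.splitOn.go]
      · simp [eqSplit]
      · omega
    | cons c rest =>
      rw [PySem.Chars.splitOn.go]
      by_cases hc : c = '='
      · subst hc
        have hp : List.isPrefixOf ['='] ('=' :: rest) = true := by simp [List.isPrefixOf]
        rw [if_pos hp]
        rw [ih _ _ _ (by simpa using Nat.lt_of_succ_lt_succ h)]
        simp [eqSplit]
      · have hp : List.isPrefixOf ['='] (c :: rest) = false := by
          simp [List.isPrefixOf]
          exact fun hh => hc hh.symm
        rw [if_neg (by simp [hp])]
        rw [ih _ _ _ (by simpa using Nat.lt_of_succ_lt_succ h)]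
        simp [eqSplit, hc]

-- eqSplit never returns []
theorem eqSplit_ne_nil (l pre : List Char) : eqSplit pre l ≠ [] := by
  induction l generalizing pre with
  | nil => simp [eqSplit]
  | cons c rest ih =>
    simp only [eqSplit]
    by_cases hc : c = '=' <;> simp [hc, ih]

theorem eqSplit_single (l pre x : List Char) (h : eqSplit pre l = [x]) : x = pre ++ l := by
  induction l generalizing pre with
  | nil => simp [eqSplit] at h; simp [h]
  | cons c rest ih =>
    simp only [eqSplit] at h
    by_cases hc : c = '='
    · subst hc
      rw [if_pos rfl] at h
      have h2 : eqSplit [] rest = [] := (List.cons.injEq _ _ _ _ ▸ h).2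
      exact absurd h2 (eqSplit_ne_nil rest [])
    · rw [if_neg hc] at h
      have := ih (pre ++ [c]) h
      simpa using this

theorem eqSplit_two (l pre k v : List Char) (hpre : '=' ∉ pre)
    (h : eqSplit pre l = [k, v]) : pre ++ l = k ++ '=' :: v ∧ '=' ∉ k := by
  induction l generalizing pre with
  | nil => simp [eqSplit] at h
  | cons c rest ih =>
    simp only [eqSplit] at h
    by_cases hc : c = '='
    · subst hc
      rw [if_pos rfl] at h
      have hk : pre = k := (List.cons.injEq _ _ _ _ ▸ h).1
      have hv : eqSplit [] rest = [v] := (List.cons.injEq _ _ _ _ ▸ h).2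
      have := eqSplit_single rest [] v hv
      subst hk
      simp at this
      simp [this, hpre]
    · rw [if_neg hc] at h
      have := ih (pre ++ [c]) (by simp [hpre]; exact fun hh => hc hh.symm) h
      simpa using this

-- key list fact: with c absent from a and b, a ++ [c] prefix of b ++ c :: v forces a = b
theorem prefix_eq_of_no_sep (c : Char) (a b v : List Char) (ha : c ∉ a) (hb : c ∉ b)
    (h : (a ++ [c]) <+: (b ++ c :: v)) : a = b := by
  induction a generalizing b with
  | nil =>
    cases b with
    | nil => rfl
    | cons y b' =>
      rcases h with ⟨t, ht⟩
      simp at ht hb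
      exact absurd ht.1 hb.1
  | cons x a' ih =>
    cases b with
    | nil =>
      rcases h with ⟨t, ht⟩
      simp at ht ha
      exact (ha.1 ht.1.symm).elim
    | cons y b' =>
      rcases h with ⟨t, ht⟩
      simp at ht ha hb
      obtain ⟨hxy, hrest⟩ := ht
      have := ih b' ha.2 hb.2 ⟨t, by simpa using hrest⟩
      simp [hxy, this]

-- characterization of pySplit on "=" when it yields two pieces
theorem pySplit_eq_two (seg k v : String) (h : pySplit seg "=" = [k, v]) :
    seg.toList = k.toList ++ '=' :: v.toList ∧ '=' ∉ k.toList := by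
  have hs : PySem.Chars.splitOn seg.toList ['='] = [k.toList, v.toList] := by
    simp only [pySplit, PySem.Str.split?, PySem.Chars.split?] at h
    simp at h
    cases hsp : PySem.Chars.splitOn seg.toList ['='] with
    | nil => rw [hsp] at h; simp at h
    | cons a t =>
      rw [hsp] at h
      cases t with
      | nil => simp at h
      | cons b t2 =>
        cases t2 with
        | nil =>
          simp at h
          obtain ⟨h1, h2⟩ := h
          simp [← h1, ← h2]
        | cons d t3 => simp at h
  have hgo := go_eq_eqSplit (seg.toList.length + 1) seg.toList [] [] (by omega)
  rw [PySem.Chars.splitOn] at hs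
  rw [hgo] at hs
  simp at hs
  exact (by simpa using eqSplit_two seg.toList [] k.toList v.toList (by simp) hs)

-- literal-key facts used by the bridge
theorem startswith_key (seg k v pre : String) (key : List Char)
    (hpre : pre.toList = key ++ ['=']) (hkey : '=' ∉ key)
    (hd : seg.toList = k.toList ++ '=' :: v.toList) (hk : '=' ∉ k.toList) :
    PySem.Str.startswith seg pre = (k.toList == key) := by
  rw [PySem.Str.startswith_eq]
  by_cases h : k.toList = key
  · have hp : pre.toList <+: seg.toList := by
      rw [hpre, hd, h]; exact ⟨v.toList, by simp⟩
    rw [(PySem.Chars.startswith_iff _ _).mpr hp]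
    simp [h]
  · have hnp : ¬ pre.toList <+: seg.toList := by
      rw [hpre, hd]
      intro hc
      exact h (prefix_eq_of_no_sep '=' key k.toList v.toList hkey hk hc).symm
    cases hsw : PySem.Chars.startswith seg.toList pre.toList with
    | false => simp [h]
    | true => exact absurd ((PySem.Chars.startswith_iff _ _).mp hsw) hnp

theorem slice_val (seg v pre : String) (hd : seg.toList = pre.toList ++ v.toList) :
    PySem.Str.slice seg (some (PySem.Str.len pre)) none = v := by
  apply String.toList_inj.mp
  rw [PySem.Str.toList_slice, PySem.Chars.slice_eq_listSlice, PySem.Str.len_eq]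
  have : (seg.toList.length : Int) = seg.toList.length := rfl
  rw [show (↑pre.toList.length : Int) = ((pre.toList.length : Nat) : Int) from rfl,
      PySem.List.slice_from_natCast]
  rw [hd]; simp

-- the bridge: under Pre_, A's step = B's startswith test
theorem credStepA_char (seg : String) (up : String × String)
    (h2 : (pySplit seg "=").length = 2) :
    credStepA up seg =
      (if PySem.Str.startswith seg "username=" then
         PySem.Str.slice seg (some (PySem.Str.len "username=")) none else up.1,
       if PySem.Str.startswith seg "password=" then
         PySem.Str.slice seg (some (PySem.Str.len "password=")) none else up.2) := by
  cases hsp : pySplit seg "=" with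
  | nil => rw [hsp] at h2; simp at h2
  | cons k t =>
    cases t with
    | nil => rw [hsp] at h2; simp at h2
    | cons v t2 =>
      cases t2 with
      | cons d t3 => rw [hsp] at h2; simp at h2
      | nil =>
        obtain ⟨hd, hk⟩ := pySplit_eq_two seg k v hsp
        have hu := startswith_key seg k v "username=" "username".toList (by decide) (by decide) hd hk
        have hpw := startswith_key seg k v "password=" "password".toList (by decide) (by decide) hd hk
        unfold credStepA
        rw [hsp, hu, hpw]
        by_cases h1 : k = "username"
        · subst h1
          have hsl : PySem.Str.slice seg (some 9) none = v := by
            simpa using slice_val seg v "username=" (by rw [hd]; rfl)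
          simp [hsl]
        · by_cases h2' : k = "password"
          · subst h2'
            have hsl : PySem.Str.slice seg (some 9) none = v := by
              simpa using slice_val seg v "password=" (by rw [hd]; rfl)
            simp [hsl]
          · have hne1 : k.toList ≠ "username".toList :=
              fun hh => h1 (String.toList_inj.mp hh)
            have hne2 : k.toList ≠ "password".toList :=
              fun hh => h2' (String.toList_inj.mp hh)
            have hl1 : ¬ k.toList = ['u','s','e','r','n','a','m','e'] :=
              fun hh => hne1 (by rw [hh]; rfl)
            have hl2 : ¬ k.toList = ['p','a','s','s','w','o','r','d'] :=
              fun hh => hne2 (by rw [hh]; rfl)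
            simp [h1, h2', hl1, hl2]

-- lastValue expressed through find? on the list it scans
theorem lastValue_eq_find (l : List String) (pre : String) :
    lastValue l pre =
      ((l.find? (fun s => PySem.Str.startswith s pre)).map
        (fun s => PySem.Str.slice s (some (PySem.Str.len pre)) none)).getD "" := by
  induction l with
  | nil => rfl
  | cons seg rest ih =>
    simp only [lastValue, List.find?]
    by_cases hs : PySem.Chars.startswith seg.toList pre.toList = true
    · simp [PySem.Str.startswith_eq, hs]
    · simp [PySem.Str.startswith_eq, hs, ih]

def optVal (l : List String) (pre : String) : Option String :=
  (l.reverse.find? (fun s => PySem.Str.startswith s pre)).map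
    (fun s => PySem.Str.slice s (some (PySem.Str.len pre)) none)

theorem cred_fold (l : List String) (u0 p0 : String)
    (h2 : ∀ p ∈ l, (pySplit p "=").length = 2) :
    l.foldl credStepA (u0, p0) =
      ((optVal l "username=").getD u0, (optVal l "password=").getD p0) := by
  induction l generalizing u0 p0 with
  | nil => simp [optVal]
  | cons seg rest ih =>
    have hseg := h2 seg (List.mem_cons_self ..)
    have hrest : ∀ p ∈ rest, (pySplit p "=").length = 2 :=
      fun q hq => h2 q (List.mem_cons_of_mem _ hq)
    simp only [List.foldl_cons]
    rw [credStepA_char seg (u0, p0) hseg]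
    rw [ih _ _ hrest]
    have key : ∀ pre u, (optVal (seg :: rest) pre).getD u
        = (optVal rest pre).getD
            (if PySem.Str.startswith seg pre then
              PySem.Str.slice seg (some (PySem.Str.len pre)) none else u) := by
      intro pre u
      simp only [optVal, List.reverse_cons, List.find?_append]
      cases hf : rest.reverse.find? (fun s => PySem.Str.startswith s pre) with
      | some s => simp
      | none =>
        simp only [Option.none_or]
        by_cases hs : PySem.Chars.startswith seg.toList pre.toList = true <;>
          simp [PySem.Str.startswith_eq, hs]
    rw [key, key]

-- ===== VERDICT (by name: the statement is the Claim_ definition above) =====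
theorem getCredentialFromUrl_spec : Claim_equal_getCredentialFromUrl := by
  intro s _ hpre
  unfold Spec_getCredentialFromUrl getCredentialFromUrl getCredentialFromUrl_alt
  by_cases hg : (PySem.Str.isIn "username" s && PySem.Str.isIn "password" s) = true
  · simp only [hg, if_true]
    rw [cred_fold _ _ _ (hpre hg)]
    rw [lastValue_eq_find, lastValue_eq_find]
    rfl
  · rw [if_neg hg, if_neg hg]
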